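-- pv_equiv track=rewrite | github.com/qyy-0712/AI-Challenge | backend/app/docker/compilers/rust_compiler.py | _parse_rust_warnings
-- ===== SOURCE A (Python) =====
-- from typing import Dict, List, Optional, Tuple, Any, Union
--
-- def _parse_rust_warnings(output: str) -> List[str]:
--     """解析Rust警告输出"""
--     warnings = []
--
--     warning_pattern = r"warning:\s*(.+)"
--     help_pattern = r"--> ([^\s:]+):(\d+):\s*(\d+)"
--
--     lines = output.split('\n')
--     for i, line in enumerate(lines):
--         line = line.strip()
--         if line.startswith("warning:"):
--             # 查找相关的位置信息
--             warning_info = line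
--             j = i + 1
--             while j < len(lines) and not lines[j].strip().startswith(("warning:", "error:", "help:")):
--                 if lines[j].strip().startswith("-->"):
--                     warning_info += " " + lines[j].strip()
--                 j += 1
--             warnings.append(warning_info)
--
--     return warnings
-- ===== SOURCE B (Python) =====
-- from typing import List
--
-- def _parse_rust_warnings(output: str) -> List[str]:
--     """Single linear pass with a state machine instead of nested scans."""
--     warnings: List[str] = []
--     cur = None  # the warning entry currently collecting '-->' lines
--     for raw in output.split('\n'):
--         line = raw.strip()
--         if line.startswith("warning:"):
--             if cur is not None:
--                 warnings.append(cur)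
--             cur = line
--         elif line.startswith(("error:", "help:")):
--             if cur is not None:
--                 warnings.append(cur)
--             cur = None
--         elif line.startswith("-->") and cur is not None:
--             cur += " " + line
--     if cur is not None:
--         warnings.append(cur)
--     return warnings
-- ===== Notes on version B (the rewrite author's own statement) =====
-- stated objective: alternative
-- what changed: Replaced A's nested scan (for every warning line an inner while re-scanning the following lines) by a single linear pass carrying the currently-open warning entry as state, deactivated on error/help marker lines.
import Mathlib
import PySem

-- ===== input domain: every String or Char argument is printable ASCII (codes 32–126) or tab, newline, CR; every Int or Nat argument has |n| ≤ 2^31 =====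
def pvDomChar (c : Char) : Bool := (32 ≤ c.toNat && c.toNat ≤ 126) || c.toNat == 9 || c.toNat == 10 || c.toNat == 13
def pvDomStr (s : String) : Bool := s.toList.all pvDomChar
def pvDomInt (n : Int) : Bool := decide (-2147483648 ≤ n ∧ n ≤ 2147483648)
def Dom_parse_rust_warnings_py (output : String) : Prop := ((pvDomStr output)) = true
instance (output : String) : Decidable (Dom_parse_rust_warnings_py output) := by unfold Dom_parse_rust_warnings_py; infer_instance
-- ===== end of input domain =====

-- B changes A's nested scan (for each warning line, an inner while over the following lines)
-- into a single linear pass carrying the currently-open warning entry as state (different decomposition).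

-- ===== PORT A =====
-- inner while loop of A: walk the lines after the warning line, appending stripped '-->' lines,
-- stopping at the next 'warning:'/'error:'/'help:' line
def pvCollectA : List String → String → String
  | [], acc => acc
  | l :: rest, acc =>
    let s := PySem.Str.strip l
    if PySem.Str.startswith s "warning:" || PySem.Str.startswith s "error:" || PySem.Str.startswith s "help:" then
      acc
    else
      pvCollectA rest (if PySem.Str.startswith s "-->" then acc ++ " " ++ s else acc)

-- outer for loop of A: at index i the remaining lines lines[i:] are (l :: rest), so the inner
-- loop starting at j = i + 1 scans rest
def pvLoopA : List String → List String → List String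
  | [], ws => ws
  | l :: rest, ws =>
    let s := PySem.Str.strip l
    if PySem.Str.startswith s "warning:" then
      pvLoopA rest (ws ++ [pvCollectA rest s])
    else
      pvLoopA rest ws

def parse_rust_warnings_py (output : String) : List String :=
  pvLoopA ((PySem.Chars.splitOn output.toList "\n".toList).map String.ofList) []

-- ===== PORT B =====
-- single pass; cur = the warning entry currently collecting '-->' lines (none = inactive)
def pvLoopB : List String → List String → Option String → List String
  | [], ws, cur => ws ++ cur.toList
  | l :: rest, ws, cur =>
    let s := PySem.Str.strip l
    if PySem.Str.startswith s "warning:" then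
      pvLoopB rest (ws ++ cur.toList) (some s)
    else if PySem.Str.startswith s "error:" || PySem.Str.startswith s "help:" then
      pvLoopB rest (ws ++ cur.toList) none
    else if PySem.Str.startswith s "-->" && cur.isSome then
      pvLoopB rest ws (cur.map (fun c => c ++ " " ++ s))
    else
      pvLoopB rest ws cur

def parse_rust_warnings_py_alt (output : String) : List String :=
  pvLoopB ((PySem.Chars.splitOn output.toList "\n".toList).map String.ofList) [] none

-- ===== PRECONDITION & SPEC =====
def Spec_parse_rust_warnings_py (output : String) (out : List String) : Prop := out = parse_rust_warnings_py_alt output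
instance (output : String) (out : List String) : Decidable (Spec_parse_rust_warnings_py output out) := by unfold Spec_parse_rust_warnings_py; infer_instance

-- ===== CLAIM (what is proved, stated in full; the proofs are below) =====
def Claim_equal_parse_rust_warnings_py : Prop := ∀ (output : String), Dom_parse_rust_warnings_py output → Spec_parse_rust_warnings_py output (parse_rust_warnings_py output)

-- ===== LEMMAS AND PROOFS =====

-- the one-pass loop with open entry `cur` equals the nested-scan loop with the entry
-- completed by the inner scan over the remaining lines
theorem pvLoopB_eq (ls : List String) : ∀ (ws : List String) (cur : Option String),
    pvLoopB ls ws cur =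
      pvLoopA ls (ws ++ (match cur with | some c => [pvCollectA ls c] | none => [])) := by
  induction ls with
  | nil =>
    intro ws cur
    cases cur <;> simp [pvLoopB, pvLoopA, pvCollectA]
  | cons l rest ih =>
    intro ws cur
    cases cur with
    | none =>
      simp only [pvLoopB, pvLoopA]
      split_ifs with h1 h2 h3 <;> simp_all
    | some c =>
      simp only [pvLoopB, pvLoopA, pvCollectA]
      split_ifs with h1 h2 h3 <;> simp_all

-- ===== VERDICT (by name: the statement is the Claim_ definition above) =====
theorem parse_rust_warnings_py_spec : Claim_equal_parse_rust_warnings_py := by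
  intro output _
  unfold Spec_parse_rust_warnings_py parse_rust_warnings_py parse_rust_warnings_py_alt
  rw [pvLoopB_eq]
  rfl
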